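-- pv_equiv track=rewrite | github.com/RayanFarahani/review-similarity | core.py | categorise_reviews
-- ===== SOURCE A (Python) =====
-- TOPIC_KEYWORDS: dict[str, list[str]] = {
--     "quality" : ["quality", "material", "fabric", "durable", "cheap",
--                  "well-made", "sturdy"],
--     "fit"     : ["fit", "fits", "size", "sizing", "tight", "loose", "snug",
--                  "small", "large", "true to size", "runs small", "runs large"],
--     "style"   : ["style", "stylish", "fashion", "look", "cute", "pretty",
--                  "elegant", "trendy", "chic", "design"],
--     "comfort" : ["comfort", "comfortable", "soft", "cozy", "cosy", "smooth",
--                  "lightweight", "breathable", "itchy", "scratchy"],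
-- }
--
-- def categorise_reviews(texts: list[str],
--                        keywords: dict | None = None) -> dict[str, list[tuple]]:
--     """Return {topic: [(index, review_text), ...]}."""
--     kws = keywords or TOPIC_KEYWORDS
--     results: dict[str, list] = {t: [] for t in kws}
--     for idx, text in enumerate(texts):
--         lower = text.lower()
--         for topic, kw_list in kws.items():
--             if any(kw in lower for kw in kw_list):
--                 results[topic].append((idx, text))
--     return results
-- ===== SOURCE B (Python) =====
-- TOPIC_KEYWORDS: dict[str, list[str]] = {
--     "quality" : ["quality", "material", "fabric", "durable", "cheap",
--                  "well-made", "sturdy"],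
--     "fit"     : ["fit", "fits", "size", "sizing", "tight", "loose", "snug",
--                  "small", "large", "true to size", "runs small", "runs large"],
--     "style"   : ["style", "stylish", "fashion", "look", "cute", "pretty",
--                  "elegant", "trendy", "chic", "design"],
--     "comfort" : ["comfort", "comfortable", "soft", "cozy", "cosy", "smooth",
--                  "lightweight", "breathable", "itchy", "scratchy"],
-- }
--
-- def categorise_reviews(texts: list[str],
--                        keywords: dict | None = None) -> dict[str, list[tuple]]:
--     """Return {topic: [(index, review_text), ...]}.
--
--     Multi-pattern position scan with first-character dispatch: all keywords
--     are flattened into one (keyword, topic) pattern list and bucketed by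
--     their first character; each text is then scanned left to right ONCE,
--     testing at every position only the patterns whose first character stands
--     there (skipping topics already matched), yielding the set of matched
--     topics per text; the per-topic lists are assembled from those sets.
--     """
--     kws = keywords or TOPIC_KEYWORDS
--     ntopics = len(kws)
--     pairs = [(kw, topic) for topic, kw_list in kws.items() for kw in kw_list]
--     buckets = {}            # first character -> patterns starting with it
--     anytopics = []          # topics with an empty keyword: match every text
--     for kw, topic in pairs:
--         if kw:
--             buckets.setdefault(kw[0], []).append((kw, topic))
--         else:
--             anytopics.append(topic)
--     tagged = []
--     for idx, text in enumerate(texts):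
--         low = text.lower()
--         matched = set()
--         for topic in anytopics:
--             matched.add(topic)
--         for pos, c in enumerate(low):
--             if len(matched) == ntopics:
--                 break
--             for kw, topic in buckets.get(c, ()):
--                 if topic not in matched and low.startswith(kw, pos):
--                     matched.add(topic)
--         tagged.append((idx, text, matched))
--     return {topic: [(i, t) for i, t, m in tagged if topic in m]
--             for topic in kws}
-- ===== Notes on version B (the rewrite author's own statement) =====
-- stated objective: alternative
-- what changed: B replaces A's per-topic, per-keyword substring searches by a multi-pattern position scan: all keywords are flattened into one (keyword, topic) pattern list bucketed by first character, each text is scanned left-to-right once testing at every position only the bucket of the character standing there (skipping matched topics and breaking once all topics are matched) to compute its matched-topic set, and the per-topic result lists are assembled afterwards from those sets; Pre_ excludes keyword association lists with duplicate topic keys, which cannot arise from a real Python dict argument.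
import Mathlib
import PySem

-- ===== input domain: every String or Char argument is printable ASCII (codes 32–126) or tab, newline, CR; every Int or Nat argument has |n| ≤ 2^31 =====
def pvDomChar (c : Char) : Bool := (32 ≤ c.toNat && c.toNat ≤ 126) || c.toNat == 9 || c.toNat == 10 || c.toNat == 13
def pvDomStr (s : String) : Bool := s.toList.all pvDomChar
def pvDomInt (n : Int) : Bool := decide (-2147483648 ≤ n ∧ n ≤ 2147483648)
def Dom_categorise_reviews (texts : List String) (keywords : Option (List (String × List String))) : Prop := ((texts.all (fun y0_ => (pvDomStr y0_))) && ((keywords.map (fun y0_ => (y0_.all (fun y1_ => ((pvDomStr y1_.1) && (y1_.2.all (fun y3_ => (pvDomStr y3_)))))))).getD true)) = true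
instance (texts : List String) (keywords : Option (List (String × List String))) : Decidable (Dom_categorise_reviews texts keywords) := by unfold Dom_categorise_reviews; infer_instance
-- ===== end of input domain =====

-- B replaces A's per-topic per-keyword substring searches by a naive multi-pattern matcher
-- (one flat pattern list, one left-to-right position scan per text yielding its matched-topic
-- set, per-topic lists assembled afterwards); same return value, objective: alternative.

-- ===== PORT A =====
-- module-level constant TOPIC_KEYWORDS
def pvTopicKeywords : List (String × List String) :=
  [("quality", ["quality", "material", "fabric", "durable", "cheap", "well-made", "sturdy"]),
   ("fit", ["fit", "fits", "size", "sizing", "tight", "loose", "snug", "small", "large",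
            "true to size", "runs small", "runs large"]),
   ("style", ["style", "stylish", "fashion", "look", "cute", "pretty", "elegant", "trendy",
              "chic", "design"]),
   ("comfort", ["comfort", "comfortable", "soft", "cozy", "cosy", "smooth", "lightweight",
                "breathable", "itchy", "scratchy"])]

-- 'any(kw in lower for kw in kw_list)'
def pvHit (p : String × List String) (lower : String) : Bool :=
  p.2.any (fun kw => PySem.Str.isIn kw lower)

-- 'results[topic].append(v)': update the (unique, by Pre_) entry with this key in place
def pvAppendAt (res : List (String × List (Int × String))) (t : String) (v : Int × String) :
    List (String × List (Int × String)) :=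
  match res with
  | [] => []
  | (k, l) :: rest => if k == t then (k, l ++ [v]) :: rest else (k, l) :: pvAppendAt rest t v

def categorise_reviews (texts : List String) (keywords : Option (List (String × List String))) : List (String × List (Int × String)) :=
  let kws := match keywords with
    | none => pvTopicKeywords
    | some l => if l.isEmpty then pvTopicKeywords else l
  -- results = {t: [] for t in kws}  (keys are distinct under Pre_)
  let results := kws.map (fun p => (p.1, ([] : List (Int × String))))
  (PySem.List.enumerate texts).foldl (fun res it =>
    let lower := PySem.Str.lower it.2
    kws.foldl (fun r p => if pvHit p lower then pvAppendAt r p.1 (it.1, it.2) else r) res)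
    results

-- ===== PORT B =====
-- (B reads the same module-level constant TOPIC_KEYWORDS = pvTopicKeywords)

-- 'pairs = [(kw, topic) for topic, kw_list in kws.items() for kw in kw_list]'
def pvPatterns (kws : List (String × List String)) : List (String × String) :=
  kws.flatMap (fun p => p.2.map (fun kw => (kw, p.1)))

-- one step of the bucket-building loop: 'if kw: buckets.setdefault(kw[0], []).append((kw, topic))
-- else: anytopics.append(topic)'; setdefault-then-append is insert of (current list ++ [pattern])
def pvBucketStep (s : PySem.Dict Char (List (String × String)) × List String)
    (q : String × String) : PySem.Dict Char (List (String × String)) × List String :=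
  match q.1.toList with
  | c :: _ => (s.1.insert c (s.1.getD c [] ++ [q]), s.2)
  | [] => (s.1, s.2 ++ [q.2])

def pvBuckets (pairs : List (String × String)) :
    PySem.Dict Char (List (String × String)) × List String :=
  pairs.foldl pvBucketStep (PySem.Dict.empty, ([] : List String))

-- the per-text scan: 'matched' starts from the empty-keyword topics, then one pass over
-- 'enumerate(low)' testing the bucket of the character standing at each position;
-- 'low.startswith(kw, pos)' with 0 ≤ pos is exactly Chars.startswith on (low.drop pos);
-- 'break' once every topic is matched is encoded as a step-wise guard (once it holds the
-- loop body never changes 'matched' again — proved in pv_guard_elim below)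
def pvMatchTopics (buckets : PySem.Dict Char (List (String × String)))
    (anytopics : List String) (ntopics : Nat) (low : List Char) : PySem.Set String :=
  (PySem.List.enumerate low).foldl (fun m pc =>
    if PySem.Set.len m == ntopics then m
    else (buckets.getD pc.2 []).foldl (fun m q =>
      if !(PySem.Set.contains m q.2) && PySem.Chars.startswith (low.drop pc.1.toNat) q.1.toList
      then PySem.Set.add m q.2 else m) m)
    (anytopics.foldl (fun m t => PySem.Set.add m t) PySem.Set.empty)

def categorise_reviews_alt (texts : List String) (keywords : Option (List (String × List String))) : List (String × List (Int × String)) :=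
  let kws := match keywords with
    | none => pvTopicKeywords
    | some l => if l.isEmpty then pvTopicKeywords else l
  let ntopics := kws.length
  let ba := pvBuckets (pvPatterns kws)
  let tagged := (PySem.List.enumerate texts).foldl (fun acc it =>
      acc ++ [(it.1, it.2, pvMatchTopics ba.1 ba.2 ntopics (PySem.Str.lower it.2).toList)]) []
  kws.map (fun p => (p.1,
    tagged.filterMap (fun q => if PySem.Set.contains q.2.2 p.1 then some (q.1, q.2.1) else none)))

-- ===== PRECONDITION & SPEC =====
-- Pre_ excludes keyword association lists with duplicate topic keys: a real Python dict argument
-- cannot contain duplicate keys, so such lists are an ambiguous representation, not an input A sees.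
def Pre_categorise_reviews (texts : List String) (keywords : Option (List (String × List String))) : Prop :=
  (((keywords.getD []).map Prod.fst)).Nodup
instance (texts : List String) (keywords : Option (List (String × List String))) : Decidable (Pre_categorise_reviews texts keywords) := by unfold Pre_categorise_reviews; infer_instance

def pvWitness_categorise_reviews : List String × (Option (List (String × List String))) :=
  (["Great quality!", "runs small"], none)

def Spec_categorise_reviews (texts : List String) (keywords : Option (List (String × List String))) (out : List (String × List (Int × String))) : Prop := out = categorise_reviews_alt texts keywords
instance (texts : List String) (keywords : Option (List (String × List String))) (out : List (String × List (Int × String))) : Decidable (Spec_categorise_reviews texts keywords out) := by unfold Spec_categorise_reviews; infer_instance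

-- ===== CLAIM (what is proved, stated in full; the proofs are below) =====
def Claim_equal_categorise_reviews : Prop := ∀ (texts : List String) (keywords : Option (List (String × List String))), Dom_categorise_reviews texts keywords → Pre_categorise_reviews texts keywords → Spec_categorise_reviews texts keywords (categorise_reviews texts keywords)

-- ===== LEMMAS AND PROOFS =====

-- ---- A-side: A's double fold commuted into per-topic filters ----

-- appending at a key of a nodup-keyed map-shaped list updates exactly the matching entries
theorem pv_appendAt_map (kws : List (String × List String))
    (g : String × List String → List (Int × String)) (t : String) (v : Int × String)
    (hnd : (kws.map Prod.fst).Nodup) :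
    pvAppendAt (kws.map (fun p => (p.1, g p))) t v
      = kws.map (fun p => (p.1, if p.1 == t then g p ++ [v] else g p)) := by
  induction kws with
  | nil => rfl
  | cons q rest ih =>
    simp only [List.map_cons, List.nodup_cons, List.mem_map] at hnd ⊢
    rcases hnd with ⟨hq, hrest⟩
    by_cases h : q.1 == t
    · simp only [pvAppendAt, h, if_pos, List.cons.injEq, true_and]
      refine (List.map_congr_left ?_).symm
      intro p hp
      have : p.1 ≠ t := by
        intro he
        exact hq ⟨p, hp, by rw [he]; exact (eq_of_beq h).symm⟩
      simp [this]
    · simp only [pvAppendAt, h, if_neg, Bool.false_eq_true, not_false_iff, ih hrest]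

-- folding A's inner per-topic loop over kws₂ on a kws-shaped accumulator
theorem pv_inner_fold (kws₂ kws : List (String × List String))
    (g : String × List String → List (Int × String)) (it : Int × String)
    (hnd : (kws.map Prod.fst).Nodup) :
    kws₂.foldl (fun r p => if pvHit p (PySem.Str.lower it.2) then pvAppendAt r p.1 (it.1, it.2) else r)
      (kws.map (fun p => (p.1, g p)))
      = kws.map (fun p => (p.1, g p ++
          (kws₂.filter (fun q => q.1 == p.1 && pvHit q (PySem.Str.lower it.2))).map (fun _ => (it.1, it.2)))) := by
  induction kws₂ generalizing g with
  | nil => simp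
  | cons q rest ih =>
    by_cases h : pvHit q (PySem.Str.lower it.2)
    · simp only [List.foldl_cons, h, if_pos,
        pv_appendAt_map kws g q.1 (it.1, it.2) hnd]
      rw [ih (fun p => if p.1 == q.1 then g p ++ [(it.1, it.2)] else g p)]
      refine List.map_congr_left ?_
      intro p _
      by_cases hk : q.1 == p.1
      · have hk' : p.1 == q.1 := by simp_all [BEq.comm]
        simp [hk, hk', h]
      · have hk' : ¬ (p.1 == q.1) := by simp_all [BEq.comm]
        simp [hk, hk', h]
    · simp only [List.foldl_cons, h, if_neg, Bool.false_eq_true, not_false_iff]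
      rw [ih g]
      refine List.map_congr_left ?_
      intro p _
      simp [h]

-- in a nodup-keyed list, filtering on key-equality with a member's key picks exactly that member
theorem pv_filter_key (kws : List (String × List String)) (p : String × List String)
    (c : String × List String → Bool)
    (hnd : (kws.map Prod.fst).Nodup) (hp : p ∈ kws) :
    kws.filter (fun q => q.1 == p.1 && c q) = if c p then [p] else [] := by
  induction kws with
  | nil => cases hp
  | cons q rest ih =>
    simp only [List.map_cons, List.nodup_cons, List.mem_map] at hnd
    rcases hnd with ⟨hq, hrest⟩
    rcases List.mem_cons.mp hp with he | hm
    · subst he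
      have hrest0 : rest.filter (fun q => q.1 == p.1 && c q) = [] := by
        refine List.filter_eq_nil_iff.mpr ?_
        intro r hr
        have : r.1 ≠ p.1 := fun he => hq ⟨r, hr, he⟩
        simp [this]
      by_cases h : c p <;> simp [h, hrest0]
    · have hq1 : ¬ (q.1 == p.1) := by
        simp only [beq_iff_eq]
        intro he
        exact hq ⟨p, hm, he.symm⟩
      simp [hq1, ih hrest hm]

-- A's whole double loop, commuted: per-topic filters of the enumerated texts
theorem pv_outer_fold (l : List (Int × String)) (kws : List (String × List String))
    (g : String × List String → List (Int × String))
    (hnd : (kws.map Prod.fst).Nodup) :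
    l.foldl (fun res it =>
        kws.foldl (fun r p => if pvHit p (PySem.Str.lower it.2) then pvAppendAt r p.1 (it.1, it.2) else r) res)
      (kws.map (fun p => (p.1, g p)))
      = kws.map (fun p => (p.1, g p ++ l.filter (fun it => pvHit p (PySem.Str.lower it.2)))) := by
  induction l generalizing g with
  | nil => simp
  | cons it l ih =>
    simp only [List.foldl_cons]
    rw [pv_inner_fold kws kws g it hnd,
        ih (fun p => g p ++ (kws.filter (fun q => q.1 == p.1 && pvHit q (PySem.Str.lower it.2))).map (fun _ => (it.1, it.2)))]
    refine List.map_congr_left ?_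
    intro p hp
    have hself : (kws.filter (fun q => q.1 == p.1 && pvHit q (PySem.Str.lower it.2)))
        = if pvHit p (PySem.Str.lower it.2) then [p] else [] :=
      pv_filter_key kws p _ hnd hp
    rw [hself]
    by_cases h : pvHit p (PySem.Str.lower it.2) <;> simp [h]

-- ---- B-side: membership in the matched-topic set ----

-- membership after the per-position pass over one bucket's pattern list
theorem pv_patscan_mem (pairs : List (String × String)) (s : List Char)
    (m : PySem.Set String) (t : String) :
    (t ∈ pairs.foldl (fun m q =>
        if !(PySem.Set.contains m q.2) && PySem.Chars.startswith s q.1.toList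
        then PySem.Set.add m q.2 else m) m)
    ↔ t ∈ m ∨ ∃ q ∈ pairs, q.2 = t ∧ PySem.Chars.startswith s q.1.toList = true := by
  induction pairs generalizing m with
  | nil => simp
  | cons q rest ih =>
    simp only [List.foldl_cons, List.mem_cons]
    by_cases hs : PySem.Chars.startswith s q.1.toList = true
    · by_cases hm : PySem.Set.contains m q.2 = true
      · have hqm : q.2 ∈ m := (PySem.Set.contains_iff m q.2).mp hm
        simp only [hm, hs, Bool.not_true, Bool.false_and, Bool.false_eq_true, if_neg,
          not_false_iff, ih]
        constructor
        · rintro (h | ⟨r, hr, hrt, hrs⟩)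
          · exact Or.inl h
          · exact Or.inr ⟨r, Or.inr hr, hrt, hrs⟩
        · rintro (h | ⟨r, hr | hr, hrt, hrs⟩)
          · exact Or.inl h
          · subst hr; exact Or.inl (hrt ▸ hqm)
          · exact Or.inr ⟨r, hr, hrt, hrs⟩
      · have hm' : PySem.Set.contains m q.2 = false := by simpa using hm
        simp only [hm', hs, Bool.not_false, Bool.true_and, if_pos, ih,
          PySem.Set.mem_add]
        constructor
        · rintro (⟨h | h⟩ | ⟨r, hr, hrt, hrs⟩)
          · exact Or.inl h
          · exact Or.inr ⟨q, Or.inl rfl, h.symm, hs⟩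
          · exact Or.inr ⟨r, Or.inr hr, hrt, hrs⟩
        · rintro (h | ⟨r, hr | hr, hrt, hrs⟩)
          · exact Or.inl (Or.inl h)
          · subst hr; exact Or.inl (Or.inr hrt.symm)
          · exact Or.inr ⟨r, hr, hrt, hrs⟩
    · have hs' : PySem.Chars.startswith s q.1.toList = false := by simpa using hs
      simp only [hs', Bool.and_false, Bool.false_eq_true, if_neg, not_false_iff, ih]
      constructor
      · rintro (h | ⟨r, hr, hrt, hrs⟩)
        · exact Or.inl h
        · exact Or.inr ⟨r, Or.inr hr, hrt, hrs⟩
      · rintro (h | ⟨r, hr | hr, hrt, hrs⟩)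
        · exact Or.inl h
        · subst hr; exact absurd hrs hs
        · exact Or.inr ⟨r, hr, hrt, hrs⟩

-- membership after the whole (guard-free) position scan
theorem pv_posscan_mem (l : List (Int × Char)) (B : PySem.Dict Char (List (String × String)))
    (low : List Char) (m : PySem.Set String) (t : String) :
    (t ∈ l.foldl (fun m pc =>
        (B.getD pc.2 []).foldl (fun m q =>
          if !(PySem.Set.contains m q.2) && PySem.Chars.startswith (low.drop pc.1.toNat) q.1.toList
          then PySem.Set.add m q.2 else m) m) m)
    ↔ t ∈ m ∨ ∃ pc ∈ l, ∃ q ∈ B.getD pc.2 [], q.2 = t ∧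
        PySem.Chars.startswith (low.drop pc.1.toNat) q.1.toList = true := by
  induction l generalizing m with
  | nil => simp
  | cons pc rest ih =>
    simp only [List.foldl_cons, ih, pv_patscan_mem, List.mem_cons]
    constructor
    · rintro (⟨h | h⟩ | ⟨i, hi, h⟩)
      · exact Or.inl h
      · exact Or.inr ⟨pc, Or.inl rfl, h⟩
      · exact Or.inr ⟨i, Or.inr hi, h⟩
    · rintro (h | ⟨i, hi | hi, h⟩)
      · exact Or.inl (Or.inl h)
      · subst hi; exact Or.inl (Or.inr h)
      · exact Or.inr ⟨i, hi, h⟩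

-- the bucket-building fold, characterised (any starting state)
theorem pv_buckets_go (pairs : List (String × String))
    (d : PySem.Dict Char (List (String × String))) (a : List String) :
    (∀ x c, x ∈ (pairs.foldl pvBucketStep (d, a)).1.getD c []
        ↔ x ∈ d.getD c [] ∨ (x ∈ pairs ∧ x.1.toList.head? = some c))
    ∧ (pairs.foldl pvBucketStep (d, a)).2
        = a ++ (pairs.filter (fun q => q.1.toList.isEmpty)).map (fun q => q.2) := by
  induction pairs generalizing d a with
  | nil => simp
  | cons q rest ih =>
    simp only [List.foldl_cons]
    cases hq : q.1.toList with
    | nil =>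
      have hstep : pvBucketStep (d, a) q = (d, a ++ [q.2]) := by
        unfold pvBucketStep; rw [hq]
      rw [hstep]
      obtain ⟨ih1, ih2⟩ := ih d (a ++ [q.2])
      refine ⟨fun x c => ?_, ?_⟩
      · rw [ih1]
        constructor
        · rintro (h | ⟨hx, hc⟩)
          · exact Or.inl h
          · exact Or.inr ⟨List.mem_cons_of_mem _ hx, hc⟩
        · rintro (h | ⟨hx, hc⟩)
          · exact Or.inl h
          · rcases List.mem_cons.mp hx with rfl | hx'
            · rw [hq] at hc; simp at hc
            · exact Or.inr ⟨hx', hc⟩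
      · rw [ih2, List.filter_cons]
        simp [hq]
    | cons ch tl =>
      have hstep : pvBucketStep (d, a) q = (d.insert ch (d.getD ch [] ++ [q]), a) := by
        unfold pvBucketStep; rw [hq]
      rw [hstep]
      obtain ⟨ih1, ih2⟩ := ih (d.insert ch (d.getD ch [] ++ [q])) a
      refine ⟨fun x c => ?_, ?_⟩
      · rw [ih1, PySem.Dict.getD_insert]
        by_cases hc : c = ch
        · subst hc
          rw [if_pos rfl, List.mem_append, List.mem_singleton]
          constructor
          · rintro ((h | rfl) | ⟨hx, hhd⟩)
            · exact Or.inl h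
            · exact Or.inr ⟨List.mem_cons_self, by rw [hq]; rfl⟩
            · exact Or.inr ⟨List.mem_cons_of_mem _ hx, hhd⟩
          · rintro (h | ⟨hx, hhd⟩)
            · exact Or.inl (Or.inl h)
            · rcases List.mem_cons.mp hx with rfl | hx'
              · exact Or.inl (Or.inr rfl)
              · exact Or.inr ⟨hx', hhd⟩
        · rw [if_neg hc]
          constructor
          · rintro (h | ⟨hx, hhd⟩)
            · exact Or.inl h
            · exact Or.inr ⟨List.mem_cons_of_mem _ hx, hhd⟩
          · rintro (h | ⟨hx, hhd⟩)
            · exact Or.inl h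
            · rcases List.mem_cons.mp hx with rfl | hx'
              · rw [hq] at hhd; simp only [List.head?_cons, Option.some.injEq] at hhd
                exact absurd hhd.symm hc
              · exact Or.inr ⟨hx', hhd⟩
      · rw [ih2, List.filter_cons]
        simp [hq]

-- membership in a first-character bucket
theorem pv_buckets_mem (pairs : List (String × String)) (x : String × String) (c : Char) :
    x ∈ (pvBuckets pairs).1.getD c [] ↔ x ∈ pairs ∧ x.1.toList.head? = some c := by
  have h := (pv_buckets_go pairs PySem.Dict.empty []).1 x c
  unfold pvBuckets
  rw [h]
  simp [PySem.Dict.getD_empty]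

-- the collected empty-keyword topics
theorem pv_anytopics (pairs : List (String × String)) (t : String) :
    t ∈ (pvBuckets pairs).2 ↔ ∃ q ∈ pairs, q.1.toList = [] ∧ q.2 = t := by
  have h := (pv_buckets_go pairs PySem.Dict.empty []).2
  unfold pvBuckets
  rw [h]
  simp [List.mem_filter, List.isEmpty_iff, and_assoc]

-- every pattern's topic is a key of kws
theorem pv_pattern_topic (kws : List (String × List String)) (q : String × String)
    (hq : q ∈ pvPatterns kws) : q.2 ∈ kws.map Prod.fst := by
  unfold pvPatterns at hq
  simp only [List.mem_flatMap, List.mem_map] at hq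
  rcases hq with ⟨r, hr, kw, _, hqe⟩
  exact List.mem_map.mpr ⟨r, hr, by rw [← hqe]⟩

-- once every bucketed topic is matched, the inner pass is the identity
theorem pv_inner_id (pairs : List (String × String)) (s : List Char) (m : PySem.Set String)
    (h : ∀ q ∈ pairs, q.2 ∈ m) :
    pairs.foldl (fun m q =>
      if !(PySem.Set.contains m q.2) && PySem.Chars.startswith s q.1.toList
      then PySem.Set.add m q.2 else m) m = m := by
  induction pairs with
  | nil => rfl
  | cons q rest ih =>
    have hc : PySem.Set.contains m q.2 = true :=
      (PySem.Set.contains_iff m q.2).mpr (h q List.mem_cons_self)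
    simp only [List.foldl_cons, hc, Bool.not_true, Bool.false_and, Bool.false_eq_true,
      if_neg, not_false_iff]
    exact ih (fun r hr => h r (List.mem_cons_of_mem _ hr))

-- the inner pass keeps the matched set duplicate-free
theorem pv_inner_nodup (pairs : List (String × String)) (s : List Char) (m : PySem.Set String)
    (hm : m.Nodup) :
    (pairs.foldl (fun m q =>
      if !(PySem.Set.contains m q.2) && PySem.Chars.startswith s q.1.toList
      then PySem.Set.add m q.2 else m) m).Nodup := by
  induction pairs generalizing m with
  | nil => exact hm
  | cons q rest ih =>
    simp only [List.foldl_cons]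
    by_cases hg : (!(PySem.Set.contains m q.2) && PySem.Chars.startswith s q.1.toList) = true
    · rw [if_pos hg]; exact ih _ (PySem.Set.nodup_add m q.2 hm)
    · rw [if_neg hg]; exact ih _ hm

-- the break guard never changes the scan's result
theorem pv_guard_elim (kws : List (String × List String)) (l : List (Int × Char))
    (low : List Char) (m : PySem.Set String) (hmn : m.Nodup)
    (hms : ∀ t ∈ m, t ∈ kws.map Prod.fst) :
    l.foldl (fun m pc =>
      if PySem.Set.len m == kws.length then m
      else ((pvBuckets (pvPatterns kws)).1.getD pc.2 []).foldl (fun m q =>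
        if !(PySem.Set.contains m q.2) && PySem.Chars.startswith (low.drop pc.1.toNat) q.1.toList
        then PySem.Set.add m q.2 else m) m) m
    = l.foldl (fun m pc =>
      ((pvBuckets (pvPatterns kws)).1.getD pc.2 []).foldl (fun m q =>
        if !(PySem.Set.contains m q.2) && PySem.Chars.startswith (low.drop pc.1.toNat) q.1.toList
        then PySem.Set.add m q.2 else m) m) m := by
  induction l generalizing m with
  | nil => rfl
  | cons pc rest ih =>
    simp only [List.foldl_cons]
    by_cases hg : (PySem.Set.len m == kws.length) = true
    · -- saturated: every topic is already in m, so every later step is the identity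
      have hlen : m.length = (kws.map Prod.fst).length := by
        have := (beq_iff_eq).mp hg
        simpa [PySem.Set.len] using this
      have hperm : m.Perm (kws.map Prod.fst) :=
        ((List.subperm_of_subset hmn hms).perm_of_length_le (le_of_eq hlen.symm))
      have hsat : ∀ t ∈ kws.map Prod.fst, t ∈ m := fun t ht => hperm.mem_iff.mpr ht
      have hall : ∀ (pc' : Int × Char) (q : String × String),
          q ∈ (pvBuckets (pvPatterns kws)).1.getD pc'.2 [] → q.2 ∈ m := by
        intro pc' q hq
        exact hsat _ (pv_pattern_topic kws q ((pv_buckets_mem _ _ _).mp hq).1)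
      rw [if_pos hg, pv_inner_id _ _ _ (hall pc)]
      exact ih m hmn hms
    · rw [if_neg (by simpa using hg)]
      refine ih _ (pv_inner_nodup _ _ _ hmn) ?_
      intro t ht
      rcases (pv_patscan_mem _ _ _ _).mp ht with h | ⟨q, hq, hqt, _⟩
      · exact hms t h
      · exact hqt ▸ pv_pattern_topic kws q ((pv_buckets_mem _ _ _).mp hq).1

-- a keyword occurs in the text iff it is empty or starts at some scanned position
theorem pv_isIn_scan (kw low : List Char) :
    PySem.Chars.isIn kw low = true
    ↔ (kw = [] ∨ ∃ pc ∈ PySem.List.enumerate low, kw.head? = some pc.2 ∧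
        PySem.Chars.startswith (low.drop pc.1.toNat) kw = true) := by
  constructor
  · intro h
    rcases (PySem.Chars.exists_prefix_drop_iff_isIn kw low).mpr h with ⟨j, hj⟩
    by_cases hkw : kw = []
    · exact Or.inl hkw
    · right
      have hdropne : low.drop j ≠ [] := by
        intro hnil
        rw [hnil] at hj
        exact hkw (List.prefix_nil.mp hj)
      have hjlt : j < low.length := by
        by_contra hge
        exact hdropne (List.drop_eq_nil_of_le (by omega))
      refine ⟨((j : Int), low[j]), ?_, ?_, ?_⟩
      · exact (PySem.List.mem_enumerate_iff _ _ _).mpr ⟨j, hjlt, by simp⟩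
      · obtain ⟨tl, htl⟩ := hj
        have hd : low.drop j = low[j] :: low.drop (j + 1) := List.drop_eq_getElem_cons hjlt
        rw [← htl] at hd
        cases kw with
        | nil => exact absurd rfl hkw
        | cons k0 ktl =>
          simp only [List.cons_append] at hd
          injection hd with h1 _
          simp [h1]
      · rw [PySem.Chars.startswith_iff]
        simpa using hj
  · rintro (rfl | ⟨pc, _, _, hsw⟩)
    · exact PySem.Chars.isIn_nil low
    · exact (PySem.Chars.exists_prefix_drop_iff_isIn kw low).mp
        ⟨pc.1.toNat, (PySem.Chars.startswith_iff _ _).mp hsw⟩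

-- in a nodup-keyed list, the pattern entries carrying p's topic are exactly p's own keywords
theorem pv_pattern_mem (kws : List (String × List String)) (p : String × List String)
    (q : String × String) (hnd : (kws.map Prod.fst).Nodup) (hp : p ∈ kws) :
    (q ∈ pvPatterns kws ∧ q.2 = p.1) ↔ q.1 ∈ p.2 ∧ q.2 = p.1 := by
  unfold pvPatterns
  simp only [List.mem_flatMap, List.mem_map]
  constructor
  · rintro ⟨⟨r, hr, kw, hkw, hq⟩, ht⟩
    have : r.1 = p.1 := by rw [← hq] at ht; exact ht
    have hrp : r = p := List.inj_on_of_nodup_map hnd hr hp this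
    subst hrp
    exact ⟨by rw [← hq]; exact hkw, ht⟩
  · rintro ⟨hkw, ht⟩
    exact ⟨⟨p, hp, q.1, hkw, by rw [← ht]⟩, ht⟩

-- B's matched-topic set answers exactly A's per-topic hit test
theorem pv_match_contains (kws : List (String × List String)) (p : String × List String)
    (low : String) (hnd : (kws.map Prod.fst).Nodup) (hp : p ∈ kws) :
    PySem.Set.contains
      (pvMatchTopics (pvBuckets (pvPatterns kws)).1 (pvBuckets (pvPatterns kws)).2
        kws.length low.toList) p.1
    = pvHit p low := by
  rw [Bool.eq_iff_iff, PySem.Set.contains_iff]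
  unfold pvMatchTopics pvHit
  have hm0 : ((pvBuckets (pvPatterns kws)).2).foldl (fun m t => PySem.Set.add m t) PySem.Set.empty
      = PySem.Set.ofList ((pvBuckets (pvPatterns kws)).2) := rfl
  rw [hm0, pv_guard_elim kws _ _ _ (PySem.Set.nodup_ofList _) ?hsub, pv_posscan_mem]
  case hsub =>
    intro t ht
    rcases (pv_anytopics _ t).mp ((PySem.Set.mem_ofList _ _).mp ht) with ⟨q, hq, _, hqt⟩
    exact hqt ▸ pv_pattern_topic kws q hq
  simp only [PySem.Set.mem_ofList, List.any_eq_true, PySem.Str.isIn_eq]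
  constructor
  · rintro (h | ⟨pc, hpc, q, hq, hqt, hsw⟩)
    · rcases (pv_anytopics _ p.1).mp h with ⟨q, hq, hqnil, hqt⟩
      have hkw : q.1 ∈ p.2 := ((pv_pattern_mem kws p q hnd hp).mp ⟨hq, hqt⟩).1
      refine ⟨q.1, hkw, ?_⟩
      rw [hqnil]
      exact PySem.Chars.isIn_nil _
    · obtain ⟨hqp, hqh⟩ := (pv_buckets_mem _ _ _).mp hq
      have hkw : q.1 ∈ p.2 := ((pv_pattern_mem kws p q hnd hp).mp ⟨hqp, hqt⟩).1
      refine ⟨q.1, hkw, ?_⟩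
      exact (pv_isIn_scan _ _).mpr (Or.inr ⟨pc, hpc, hqh, hsw⟩)
  · rintro ⟨kw, hkw, hin⟩
    have hqp : (kw, p.1) ∈ pvPatterns kws :=
      ((pv_pattern_mem kws p (kw, p.1) hnd hp).mpr ⟨hkw, rfl⟩).1
    rcases (pv_isIn_scan kw.toList low.toList).mp hin with hnil | ⟨pc, hpc, hhd, hsw⟩
    · exact Or.inl ((pv_anytopics _ p.1).mpr ⟨(kw, p.1), hqp, hnil, rfl⟩)
    · refine Or.inr ⟨pc, hpc, (kw, p.1), ?_, rfl, hsw⟩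
      exact (pv_buckets_mem _ _ _).mpr ⟨hqp, hhd⟩

-- a filterMap selecting whole elements on a boolean test is a filter
theorem pv_tag_select (f : Int × String → PySem.Set String) (sel : String)
    (l : List (Int × String)) :
    (l.map (fun it => (it.1, it.2, f it))).filterMap
        (fun q => if PySem.Set.contains q.2.2 sel then some (q.1, q.2.1) else none)
      = l.filter (fun it => PySem.Set.contains (f it) sel) := by
  induction l with
  | nil => rfl
  | cons a l ih =>
    cases hb : PySem.Set.contains (f a) sel
    · simp only [List.map_cons, List.filterMap_cons, List.filter_cons, hb,
        Bool.false_eq_true, if_false, ih]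
    · simp only [List.map_cons, List.filterMap_cons, List.filter_cons, hb, if_true, ih,
        Prod.mk.eta]

-- the two bodies agree for any nodup-keyed keyword list
theorem pv_main (texts : List String) (kws : List (String × List String))
    (hnd : (kws.map Prod.fst).Nodup) :
    (PySem.List.enumerate texts).foldl (fun res it =>
        kws.foldl (fun r p => if pvHit p (PySem.Str.lower it.2) then pvAppendAt r p.1 (it.1, it.2) else r)
      res)
      (kws.map (fun p => (p.1, ([] : List (Int × String)))))
    = kws.map (fun p => (p.1,
        ((PySem.List.enumerate texts).foldl (fun acc it =>
            acc ++ [(it.1, it.2, pvMatchTopics (pvBuckets (pvPatterns kws)).1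
              (pvBuckets (pvPatterns kws)).2 kws.length (PySem.Str.lower it.2).toList)]) []).filterMap
          (fun q => if PySem.Set.contains q.2.2 p.1 then some (q.1, q.2.1) else none))) := by
  rw [show (kws.map (fun p => (p.1, ([] : List (Int × String))))) =
      kws.map (fun p => (p.1, (fun _ => ([] : List (Int × String))) p)) from rfl,
    pv_outer_fold (PySem.List.enumerate texts) kws _ hnd]
  simp only [PySem.List.foldl_append_singleton_eq_map]
  refine List.map_congr_left ?_
  intro p hp
  rw [List.nil_append, List.nil_append, pv_tag_select]
  have hcong : List.filter
        (fun it => PySem.Set.contains (pvMatchTopics (pvBuckets (pvPatterns kws)).1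
          (pvBuckets (pvPatterns kws)).2 kws.length (PySem.Str.lower it.2).toList) p.1)
        (PySem.List.enumerate texts)
      = List.filter (fun it => pvHit p (PySem.Str.lower it.2)) (PySem.List.enumerate texts) :=
    List.filter_congr (fun it _ => pv_match_contains kws p (PySem.Str.lower it.2) hnd hp)
  rw [hcong]

-- ===== VERDICT (by name: the statement is the Claim_ definition above) =====
theorem categorise_reviews_spec : Claim_equal_categorise_reviews := by
  intro texts keywords _ hpre
  unfold Pre_categorise_reviews at hpre
  unfold Spec_categorise_reviews categorise_reviews categorise_reviews_alt
  cases keywords with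
  | none => exact pv_main texts pvTopicKeywords (by decide)
  | some l =>
    simp only [Option.getD_some] at hpre
    by_cases hl : l.isEmpty
    · simp only [hl, if_true]
      exact pv_main texts pvTopicKeywords (by decide)
    · have hl' : l.isEmpty = false := by simpa using hl
      simp only [hl', Bool.false_eq_true, if_false]
      exact pv_main texts l hpre
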